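-- pv_equiv track=rewrite | github.com/abhilashasancheti/script-generation | code/evaluation.py | group_hypotheses
-- ===== SOURCE A (Python) =====
-- NUM_SEQUENCES = 5
--
-- def group_hypotheses(hypotheses):
--     hypotheses_basic = []
--     num_inputs = len(hypotheses)//NUM_SEQUENCES
--     for i in range(NUM_SEQUENCES):
--         hypos = []
--         for j in range(num_inputs):
--             hypos.append(hypotheses[i+(j*NUM_SEQUENCES)].strip().split(':')[1].lstrip())
--         hypotheses_basic.append(hypos)
--     return hypotheses_basic
-- ===== SOURCE B (Python) =====
-- NUM_SEQUENCES = 5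
--
-- def group_hypotheses(hypotheses):
--     buckets = [[] for _ in range(NUM_SEQUENCES)]
--     limit = len(hypotheses) // NUM_SEQUENCES * NUM_SEQUENCES
--     for idx, h in enumerate(hypotheses[:limit]):
--         buckets[idx % NUM_SEQUENCES].append(h.strip().split(':')[1].lstrip())
--     return buckets
-- ===== Notes on version B (the rewrite author's own statement) =====
-- stated objective: alternative
-- what changed: A makes five strided passes over the list (outer loop over columns, inner loop computing index i+j*5); B makes a single in-order pass over the usable prefix, distributing each parsed element into one of five buckets by idx % 5.
import Mathlib
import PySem

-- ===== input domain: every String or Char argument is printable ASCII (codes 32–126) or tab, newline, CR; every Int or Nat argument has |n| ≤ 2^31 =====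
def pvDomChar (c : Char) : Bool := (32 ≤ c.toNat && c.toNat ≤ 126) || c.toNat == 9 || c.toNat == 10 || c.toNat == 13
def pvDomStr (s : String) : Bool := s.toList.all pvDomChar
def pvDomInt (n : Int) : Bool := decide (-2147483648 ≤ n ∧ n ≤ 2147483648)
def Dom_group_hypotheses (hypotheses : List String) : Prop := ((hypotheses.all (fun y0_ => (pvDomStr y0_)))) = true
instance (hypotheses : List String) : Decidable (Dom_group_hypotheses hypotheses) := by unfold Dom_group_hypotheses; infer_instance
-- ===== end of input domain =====

-- B replaces A's five strided column passes by a single in-order pass over the usable prefix that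
-- distributes each parsed element into one of five buckets by idx % 5 (alternative decomposition, same cost).

-- ===== PORT A =====
-- shared per-element parse: h.strip().split(':')[1].lstrip()  (index 1 in range under Pre_)
def pvParse (h : String) : String :=
  PySem.Str.lstrip (PySem.List.pyGetD ((PySem.Str.split? (PySem.Str.strip h) ":").getD []) 1 "")

def group_hypotheses (hypotheses : List String) : List (List String) :=
  let numInputs : Int := PySem.Int.floordiv (hypotheses.length : Int) 5
  (PySem.List.pyRange 0 5 1).foldl (fun acc i =>
    acc ++ [(PySem.List.pyRange 0 numInputs 1).foldl (fun hypos j =>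
      hypos ++ [pvParse (PySem.List.pyGetD hypotheses (i + j * 5) "")]) []]) []

-- ===== PORT B =====
-- loop body of B: buckets[idx % 5].append(parse(h))
def pvStep (buckets : List (List String)) (ih : Int × String) : List (List String) :=
  let k := PySem.Int.mod ih.1 5
  PySem.List.pySetD buckets k (PySem.List.pyGetD buckets k [] ++ [pvParse ih.2])

def group_hypotheses_alt (hypotheses : List String) : List (List String) :=
  let limit : Int := PySem.Int.floordiv (hypotheses.length : Int) 5 * 5
  (PySem.List.enumerate (PySem.List.slice hypotheses none (some limit)) 0).foldl
    pvStep [[], [], [], [], []]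

-- ===== PRECONDITION & SPEC =====
-- Pre_ excludes exactly the inputs where A raises IndexError: one of the first 5*(len//5)
-- elements (the ones both programs access) contains no ':', so split(':')[1] is out of range.
def Pre_group_hypotheses (hypotheses : List String) : Prop :=
  ∀ s ∈ hypotheses.take (5 * (hypotheses.length / 5)), ':' ∈ s.toList

instance (hypotheses : List String) : Decidable (Pre_group_hypotheses hypotheses) := by
  unfold Pre_group_hypotheses; infer_instance

def pvWitness_group_hypotheses : List String :=
  ["a: 1", "b: 2", "c: 3", "d: 4", "e: 5"]

def Spec_group_hypotheses (hypotheses : List String) (out : List (List String)) : Prop := out = group_hypotheses_alt hypotheses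
instance (hypotheses : List String) (out : List (List String)) : Decidable (Spec_group_hypotheses hypotheses out) := by unfold Spec_group_hypotheses; infer_instance

-- ===== CLAIM (what is proved, stated in full; the proofs are below) =====
def Claim_equal_group_hypotheses : Prop := ∀ (hypotheses : List String), Dom_group_hypotheses hypotheses → Pre_group_hypotheses hypotheses → Spec_group_hypotheses hypotheses (group_hypotheses hypotheses)

-- ===== LEMMAS AND PROOFS =====

-- the parsed column i of a list read 5 at a time (proof-only normal form)
def colStride (i : Nat) : List String → List String
  | a :: b :: c :: d :: e :: rest => pvParse ([a, b, c, d, e].getD i "") :: colStride i rest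
  | _ => []

theorem step0 (idx : Int) (x : String) (l0 l1 l2 l3 l4 : List String)
    (h : PySem.Int.mod idx 5 = 0) :
    pvStep [l0, l1, l2, l3, l4] (idx, x) = [l0 ++ [pvParse x], l1, l2, l3, l4] := by
  unfold pvStep; rw [h]; rfl

theorem step1 (idx : Int) (x : String) (l0 l1 l2 l3 l4 : List String)
    (h : PySem.Int.mod idx 5 = 1) :
    pvStep [l0, l1, l2, l3, l4] (idx, x) = [l0, l1 ++ [pvParse x], l2, l3, l4] := by
  unfold pvStep; rw [h]; rfl

theorem step2 (idx : Int) (x : String) (l0 l1 l2 l3 l4 : List String)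
    (h : PySem.Int.mod idx 5 = 2) :
    pvStep [l0, l1, l2, l3, l4] (idx, x) = [l0, l1, l2 ++ [pvParse x], l3, l4] := by
  unfold pvStep; rw [h]; rfl

theorem step3 (idx : Int) (x : String) (l0 l1 l2 l3 l4 : List String)
    (h : PySem.Int.mod idx 5 = 3) :
    pvStep [l0, l1, l2, l3, l4] (idx, x) = [l0, l1, l2, l3 ++ [pvParse x], l4] := by
  unfold pvStep; rw [h]; rfl

theorem step4 (idx : Int) (x : String) (l0 l1 l2 l3 l4 : List String)
    (h : PySem.Int.mod idx 5 = 4) :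
    pvStep [l0, l1, l2, l3, l4] (idx, x) = [l0, l1, l2, l3, l4 ++ [pvParse x]] := by
  unfold pvStep; rw [h]; rfl

-- B's fold over the enumerated prefix yields the five strided columns, appended to the buckets
theorem fold5 (m : Nat) (ys : List String) (hlen : ys.length = 5 * m) (t : Nat)
    (b0 b1 b2 b3 b4 : List String) :
    (PySem.List.enumerate ys ((5 * t : Nat) : Int)).foldl pvStep [b0, b1, b2, b3, b4]
      = [b0 ++ colStride 0 ys, b1 ++ colStride 1 ys, b2 ++ colStride 2 ys,
         b3 ++ colStride 3 ys, b4 ++ colStride 4 ys] := by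
  induction m generalizing ys t b0 b1 b2 b3 b4 with
  | zero =>
      have : ys = [] := List.eq_nil_of_length_eq_zero (by omega)
      subst this
      simp [PySem.List.enumerate, colStride]
  | succ m ih =>
      match ys, hlen with
      | a :: b :: c :: d :: e :: rest, hlen =>
        have hrest : rest.length = 5 * m := by
          simp only [List.length_cons] at hlen; omega
        simp only [PySem.List.enumerate_cons, List.foldl_cons]
        rw [step0 _ a _ _ _ _ _ (by rw [PySem.Int.mod_eq_emod_of_pos (by omega)]; omega)]
        rw [step1 _ b _ _ _ _ _ (by rw [PySem.Int.mod_eq_emod_of_pos (by omega)]; omega)]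
        rw [step2 _ c _ _ _ _ _ (by rw [PySem.Int.mod_eq_emod_of_pos (by omega)]; omega)]
        rw [step3 _ d _ _ _ _ _ (by rw [PySem.Int.mod_eq_emod_of_pos (by omega)]; omega)]
        rw [step4 _ e _ _ _ _ _ (by rw [PySem.Int.mod_eq_emod_of_pos (by omega)]; omega)]
        rw [show ((5 * t : Nat) : Int) + 1 + 1 + 1 + 1 + 1 = ((5 * (t + 1) : Nat) : Int) from by
          push_cast; ring]
        rw [ih rest hrest (t + 1)]
        simp [colStride, List.append_assoc]

-- the strided column as a map over row indices
theorem colStride_eq (m : Nat) (i : Nat) (hi : i < 5) (ys : List String)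
    (hlen : ys.length = 5 * m) :
    colStride i ys = (List.range m).map (fun j => pvParse (ys.getD (j * 5 + i) "")) := by
  induction m generalizing ys with
  | zero =>
      have : ys = [] := List.eq_nil_of_length_eq_zero (by omega)
      subst this
      simp [colStride]
  | succ m ih =>
      match ys, hlen with
      | a :: b :: c :: d :: e :: rest, hlen =>
        have hrest : rest.length = 5 * m := by
          simp only [List.length_cons] at hlen; omega
        have hc : colStride i (a :: b :: c :: d :: e :: rest)
            = pvParse ([a, b, c, d, e].getD i "") :: colStride i rest := rfl
        rw [hc, ih rest hrest, List.range_succ_eq_map, List.map_cons, List.map_map,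
          List.cons.injEq]
        refine ⟨?_, ?_⟩
        · show pvParse ([a, b, c, d, e].getD i "")
            = pvParse ((a :: b :: c :: d :: e :: rest).getD (0 * 5 + i) "")
          congr 1
          interval_cases i <;> rfl
        · apply List.map_congr_left
          intro j _
          simp only [Function.comp]
          congr 1
          rw [show (j + 1) * 5 + i = j * 5 + i + 1 + 1 + 1 + 1 + 1 from by ring]
          simp

-- A's inner loop, as a map over j
theorem inner_A (xs : List String) (n : Nat) (i : Nat) :
    (PySem.List.pyRange 0 ((n : Nat) : Int) 1).foldl (fun hypos j =>
      hypos ++ [pvParse (PySem.List.pyGetD xs ((i : Int) + j * 5) "")]) []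
    = (List.range n).map (fun j => pvParse (xs.getD (j * 5 + i) "")) := by
  rw [PySem.List.foldl_append_singleton_eq_map, PySem.List.pyRange_zero_nat, List.map_map]
  apply List.map_congr_left
  intro j hj
  simp only [Function.comp]
  rw [show (i : Int) + (j : Int) * 5 = ((j * 5 + i : Nat) : Int) by push_cast; ring,
    PySem.List.pyGetD_natCast]

-- getD on the prefix agrees with getD on the full list at the accessed indices
theorem getD_take_prefix (xs : List String) (n k : Nat) (hk : k < n) :
    (xs.take n).getD k "" = xs.getD k "" := by
  simp [List.getD_eq_getElem?_getD, hk]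

-- ===== VERDICT (by name: the statement is the Claim_ definition above) =====
theorem group_hypotheses_spec : Claim_equal_group_hypotheses := by
  intro xs _ _
  unfold Spec_group_hypotheses
  show group_hypotheses xs = group_hypotheses_alt xs
  simp only [group_hypotheses, group_hypotheses_alt]
  have hfd : PySem.Int.floordiv (xs.length : Int) 5 = ((xs.length / 5 : Nat) : Int) := by
    exact_mod_cast PySem.Int.floordiv_natCast xs.length 5
  rw [show PySem.Int.floordiv (xs.length : Int) 5 * 5 = ((xs.length / 5 * 5 : Nat) : Int) from by
    rw [hfd]; push_cast; ring]
  rw [PySem.List.slice_to_natCast, hfd]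
  have htk : (xs.take (xs.length / 5 * 5)).length = 5 * (xs.length / 5) := by
    have h5 : xs.length / 5 * 5 ≤ xs.length := Nat.div_mul_le_self xs.length 5
    simp [List.length_take, Nat.min_eq_left h5]
    omega
  have hB : (PySem.List.enumerate (xs.take (xs.length / 5 * 5)) 0).foldl pvStep
      [[], [], [], [], []]
      = [colStride 0 (xs.take (xs.length / 5 * 5)), colStride 1 (xs.take (xs.length / 5 * 5)),
         colStride 2 (xs.take (xs.length / 5 * 5)), colStride 3 (xs.take (xs.length / 5 * 5)),
         colStride 4 (xs.take (xs.length / 5 * 5))] := by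
    have := fold5 (xs.length / 5) (xs.take (xs.length / 5 * 5)) htk 0 [] [] [] [] []
    simpa using this
  rw [hB]
  have hcol : ∀ i : Nat, i < 5 →
      colStride i (xs.take (xs.length / 5 * 5))
        = (List.range (xs.length / 5)).map (fun j => pvParse (xs.getD (j * 5 + i) "")) := by
    intro i hi
    rw [colStride_eq (xs.length / 5) i hi _ htk]
    apply List.map_congr_left
    intro j hj
    have hj' : j < xs.length / 5 := by simpa using hj
    rw [getD_take_prefix xs (xs.length / 5 * 5) (j * 5 + i) (by omega)]
  rw [PySem.List.foldl_append_singleton_eq_map]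
  rw [show PySem.List.pyRange 0 5 1 = [0, 1, 2, 3, 4] from by decide]
  simp only [List.map]
  have e0 := inner_A xs (xs.length / 5) 0
  have e1 := inner_A xs (xs.length / 5) 1
  have e2 := inner_A xs (xs.length / 5) 2
  have e3 := inner_A xs (xs.length / 5) 3
  have e4 := inner_A xs (xs.length / 5) 4
  simp only [Nat.cast_zero, Nat.cast_one, Nat.cast_ofNat] at e0 e1 e2 e3 e4
  rw [e0, e1, e2, e3, e4]
  rw [hcol 0 (by omega), hcol 1 (by omega), hcol 2 (by omega), hcol 3 (by omega), hcol 4 (by omega)]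
  simp
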